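-- pv_equiv track=rewrite | github.com/gahyun-git/tarot-api | scripts/cache_archive_images.py | id_to_filename
-- ===== SOURCE A (Python) =====
-- MAJOR_NAMES = [
--     "fool",
--     "magician",
--     "priestess",
--     "empress",
--     "emperor",
--     "hierophant",
--     "lovers",
--     "chariot",
--     "strength",
--     "hermit",
--     "fortune",
--     "justice",
--     "hanged",
--     "death",
--     "temperance",
--     "devil",
--     "tower",
--     "star",
--     "moon",
--     "sun",
--     "judgement",
--     "world",
-- ]
--
-- SUITS = [("wands", 50), ("cups", 22), ("swords", 36), ("pentacles", 64)]
--
-- RANKS = [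
--     ("ace", 0),
--     ("2", 1),
--     ("3", 2),
--     ("4", 3),
--     ("5", 4),
--     ("6", 5),
--     ("7", 6),
--     ("8", 7),
--     ("9", 8),
--     ("10", 9),
--     ("page", 10),
--     ("knight", 11),
--     ("queen", 12),
--     ("king", 13),
-- ]
--
-- def id_to_filename(cid: int) -> str:
--     if 0 <= cid <= 21:
--         key = MAJOR_NAMES[cid]
--         return f"major_arcana_{key}.png"
--     # minors
--     for suit, start in SUITS:
--         if start <= cid <= start + 13:
--             rank_name, offset = RANKS[cid - start]
--             return f"minor_arcana_{suit}_{rank_name}.png"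
--     raise ValueError(f"invalid card id: {cid}")
-- ===== SOURCE B (Python) =====
-- MAJOR_NAMES = [
--     "fool", "magician", "priestess", "empress", "emperor", "hierophant",
--     "lovers", "chariot", "strength", "hermit", "fortune", "justice",
--     "hanged", "death", "temperance", "devil", "tower", "star", "moon",
--     "sun", "judgement", "world",
-- ]
--
-- SUITS = [("wands", 50), ("cups", 22), ("swords", 36), ("pentacles", 64)]
--
-- RANKS = [
--     ("ace", 0), ("2", 1), ("3", 2), ("4", 3), ("5", 4), ("6", 5),
--     ("7", 6), ("8", 7), ("9", 8), ("10", 9), ("page", 10),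
--     ("knight", 11), ("queen", 12), ("king", 13),
-- ]
--
-- TABLE = {}
-- for _i, _name in enumerate(MAJOR_NAMES):
--     TABLE[_i] = f"major_arcana_{_name}.png"
-- for _suit, _start in SUITS:
--     for _rank_name, _offset in RANKS:
--         TABLE[_start + _offset] = f"minor_arcana_{_suit}_{_rank_name}.png"
--
-- def id_to_filename(cid: int) -> str:
--     try:
--         return TABLE[cid]
--     except KeyError:
--         raise ValueError(f"invalid card id: {cid}")
-- ===== Notes on version B (the rewrite author's own statement) =====
-- stated objective: simpler
-- what changed: Replaces the per-call branch-and-suit-range scan with one module-load dict TABLE mapping every valid id to its filename; the function body is a single dict lookup.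
import Mathlib
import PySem

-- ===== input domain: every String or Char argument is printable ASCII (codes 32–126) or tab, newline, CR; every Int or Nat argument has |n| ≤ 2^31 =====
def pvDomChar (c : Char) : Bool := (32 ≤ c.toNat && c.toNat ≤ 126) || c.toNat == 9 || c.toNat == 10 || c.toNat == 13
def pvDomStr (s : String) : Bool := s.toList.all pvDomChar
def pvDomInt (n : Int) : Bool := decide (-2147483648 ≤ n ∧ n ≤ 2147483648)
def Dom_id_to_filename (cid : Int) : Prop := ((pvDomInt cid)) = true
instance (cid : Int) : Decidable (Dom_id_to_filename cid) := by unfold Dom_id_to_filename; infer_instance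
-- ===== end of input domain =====

-- B replaces A's per-call suit-range scan by a dict TABLE built once at module load; body = one lookup (return value equivalence; same ValueError outside Pre_).

def pvMajorNames : List String :=
  ["fool", "magician", "priestess", "empress", "emperor", "hierophant",
   "lovers", "chariot", "strength", "hermit", "fortune", "justice",
   "hanged", "death", "temperance", "devil", "tower", "star", "moon",
   "sun", "judgement", "world"]

def pvSuits : List (String × Int) := [("wands", 50), ("cups", 22), ("swords", 36), ("pentacles", 64)]

def pvRanks : List (String × Int) :=
  [("ace", 0), ("2", 1), ("3", 2), ("4", 3), ("5", 4), ("6", 5),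
   ("7", 6), ("8", 7), ("9", 8), ("10", 9), ("page", 10),
   ("knight", 11), ("queen", 12), ("king", 13)]

-- ===== PORT A =====
-- the 'for suit, start in SUITS' loop; [] = the final 'raise ValueError' (excluded by Pre_)
def pvSuitLoop (cid : Int) : List (String × Int) → String
  | [] => ""
  | (suit, start) :: rest =>
    if start ≤ cid ∧ cid ≤ start + 13 then
      let rp := (PySem.List.pyGet? pvRanks (cid - start)).getD ("", 0)
      "minor_arcana_" ++ suit ++ "_" ++ rp.1 ++ ".png"
    else pvSuitLoop cid rest

def id_to_filename (cid : Int) : String :=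
  if 0 ≤ cid ∧ cid ≤ 21 then
    let key := (PySem.List.pyGet? pvMajorNames cid).getD ""
    "major_arcana_" ++ key ++ ".png"
  else
    pvSuitLoop cid pvSuits

-- ===== PORT B =====
-- TABLE built once: majors via enumerate, minors via nested folds over SUITS × RANKS
def pvTable : PySem.Dict Int String :=
  let d := (PySem.List.enumerate pvMajorNames 0).foldl
    (fun d p => d.insert ((p.1 : Int)) ("major_arcana_" ++ p.2 ++ ".png")) PySem.Dict.empty
  pvSuits.foldl (fun d s =>
    pvRanks.foldl (fun d r =>
      d.insert (s.2 + r.2) ("minor_arcana_" ++ s.1 ++ "_" ++ r.1 ++ ".png")) d) d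

-- the KeyError → ValueError path (excluded by Pre_) is the none branch
def id_to_filename_alt (cid : Int) : String :=
  (pvTable.get? cid).getD ""

-- ===== PRECONDITION & SPEC =====
-- exactly the ids on which Python A returns (0..77); outside, A raises ValueError
def Pre_id_to_filename (cid : Int) : Prop := 0 ≤ cid ∧ cid ≤ 77
instance (cid : Int) : Decidable (Pre_id_to_filename cid) := by unfold Pre_id_to_filename; infer_instance
def pvWitness_id_to_filename : Int := (40)

def Spec_id_to_filename (cid : Int) (out : String) : Prop := out = id_to_filename_alt cid
instance (cid : Int) (out : String) : Decidable (Spec_id_to_filename cid out) := by unfold Spec_id_to_filename; infer_instance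

-- ===== CLAIM (what is proved, stated in full; the proofs are below) =====
def Claim_equal_id_to_filename : Prop := ∀ (cid : Int), Dom_id_to_filename cid → Pre_id_to_filename cid → Spec_id_to_filename cid (id_to_filename cid)

-- ===== LEMMAS AND PROOFS =====

-- ===== VERDICT (by name: the statement is the Claim_ definition above) =====
set_option maxRecDepth 4096 in
theorem id_to_filename_spec : Claim_equal_id_to_filename := by
  intro cid _ hpre
  obtain ⟨h1, h2⟩ := hpre
  unfold Spec_id_to_filename
  interval_cases cid <;> decide
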